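-- pv_equiv track=rewrite | github.com/MenkeTechnologies/zpwr | scripts/mantozshcomp.py | count_argument_dashes
-- ===== SOURCE A (Python) =====
-- def count_argument_dashes(line):
--     # Determine how many dashes the line has using the following regex hack
--     # Look for the start of a line, followed by a dot, then a sequence of
--     # one or more dashes ('Fl')
--     result = 0
--     if line.startswith("."):
--         line = line[4:]
--         while line.startswith("Fl "):
--             result = result + 1
--             line = line[3:]
--     return result
-- ===== SOURCE B (Python) =====
-- def count_argument_dashes(line):
--     # Single char-level scan: the longest prefix of line[4:] matching the
--     # cyclic pattern "Fl " gives the token count as length // 3.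
--     if not line.startswith("."):
--         return 0
--     s = line[4:]
--     i = 0
--     while i < len(s) and s[i] == "Fl "[i % 3]:
--         i += 1
--     return i // 3
-- ===== Notes on version B (the rewrite author's own statement) =====
-- stated objective: alternative
-- what changed: Replaces the repeated startswith('Fl ')-and-reslice loop by a single char-by-char scan against the cyclic pattern 'Fl ' followed by an integer division by 3.
import Mathlib
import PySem

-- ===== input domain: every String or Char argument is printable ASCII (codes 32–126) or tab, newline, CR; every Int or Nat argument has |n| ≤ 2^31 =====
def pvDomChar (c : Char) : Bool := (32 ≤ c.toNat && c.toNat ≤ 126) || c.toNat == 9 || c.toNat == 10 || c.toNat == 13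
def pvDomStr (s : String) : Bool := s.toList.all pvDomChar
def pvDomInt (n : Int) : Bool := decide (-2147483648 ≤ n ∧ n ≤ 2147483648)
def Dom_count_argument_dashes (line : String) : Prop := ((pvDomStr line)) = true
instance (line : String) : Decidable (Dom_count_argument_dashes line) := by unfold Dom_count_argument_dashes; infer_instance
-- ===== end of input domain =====

-- B re-implements A's repeated startswith("Fl ")/reslice loop as one char-by-char
-- scan against the cyclic pattern "Fl " followed by // 3 (objective: alternative).

-- ===== PORT A =====
-- the while loop: while line.startswith("Fl "): result += 1; line = line[3:]
-- startswith("Fl ") on the char list is matching the three leading chars (exact).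
def pvALoop : List Char → Int → Int
  | 'F' :: 'l' :: ' ' :: rest, r => pvALoop rest (r + 1)
  | _, r => r

def count_argument_dashes (line : String) : Int :=
  -- result = 0; if line.startswith("."): line = line[4:]; <loop>
  if PySem.Str.startswith line "." then pvALoop (line.toList.drop 4) 0 else 0

-- ===== PORT B =====
-- "Fl "[i % 3]  (i % 3 is always in range, so the indexing is exact)
def pvPatChar (i : Nat) : Char :=
  if i % 3 = 0 then 'F' else if i % 3 = 1 then 'l' else ' '

-- while i < len(s) and s[i] == "Fl "[i % 3]: i += 1   — returns the final i
def pvMatchLen : List Char → Nat → Nat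
  | [], _ => 0
  | c :: rest, i => if c = pvPatChar i then 1 + pvMatchLen rest (i + 1) else 0

def count_argument_dashes_alt (line : String) : Int :=
  if PySem.Str.startswith line "." then
    ((pvMatchLen (line.toList.drop 4) 0) / 3 : Nat)   -- i // 3, i ≥ 0
  else 0

-- ===== PRECONDITION & SPEC =====
def Spec_count_argument_dashes (line : String) (out : Int) : Prop := out = count_argument_dashes_alt line
instance (line : String) (out : Int) : Decidable (Spec_count_argument_dashes line out) := by unfold Spec_count_argument_dashes; infer_instance

-- ===== CLAIM (what is proved, stated in full; the proofs are below) =====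
def Claim_equal_count_argument_dashes : Prop := ∀ (line : String), Dom_count_argument_dashes line → Spec_count_argument_dashes line (count_argument_dashes line)

-- ===== LEMMAS AND PROOFS =====

theorem pvMatchLen_add_three (s : List Char) : ∀ i, pvMatchLen s (i + 3) = pvMatchLen s i := by
  induction s with
  | nil => intro i; rfl
  | cons c rest ih =>
      intro i
      have hp : pvPatChar (i + 3) = pvPatChar i := by
        unfold pvPatChar; rw [Nat.add_mod_right]
      show (if c = pvPatChar (i + 3) then 1 + pvMatchLen rest (i + 3 + 1) else 0)
           = (if c = pvPatChar i then 1 + pvMatchLen rest (i + 1) else 0)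
      rw [hp]
      have h4 : i + 3 + 1 = (i + 1) + 3 := by omega
      rw [h4, ih]

theorem pvALoop_eq (s : List Char) (r : Int) : pvALoop s r = r + ((pvMatchLen s 0 : Nat) : Int) / 3 := by
  fun_induction pvALoop s r with
  | case1 rest r ih =>
      have h3 : pvMatchLen ('F' :: 'l' :: ' ' :: rest) 0 = 3 + pvMatchLen rest 0 := by
        have h := pvMatchLen_add_three rest 0
        simp [pvMatchLen, pvPatChar] at h ⊢
        omega
      rw [ih, h3]
      push_cast
      omega
  | case2 s r hne =>
      have hlt : pvMatchLen s 0 < 3 := by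
        match s, hne with
        | [], _ => simp [pvMatchLen]
        | [c], _ => simp [pvMatchLen]; split_ifs <;> omega
        | [c1, c2], _ => simp [pvMatchLen]; split_ifs <;> omega
        | c1 :: c2 :: c3 :: rest, hne =>
            simp only [pvMatchLen, pvPatChar]
            norm_num
            split_ifs with h1 h2 h3
            · exact ((hne rest (by rw [h1, h2, h3])).elim)
            all_goals omega
      omega

-- ===== VERDICT (by name: the statement is the Claim_ definition above) =====
theorem count_argument_dashes_spec : Claim_equal_count_argument_dashes := by
  intro line _
  unfold Spec_count_argument_dashes count_argument_dashes count_argument_dashes_alt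
  split
  · rw [pvALoop_eq]; omega
  · rfl
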